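-- pv_equiv track=rewrite | github.com/krinalsuthar/code-translator | app.py | java_to_js
-- ===== SOURCE A (Python) =====
-- def java_to_js(java_code):
--     """Translate Java code to JavaScript."""
--     replacements = {
--         "System.out.println(": "console.log(",  # Print statements
--         "public static void main(String[] args)": "function main()",  # Main function
--         "int ": "let ",  # Variable declarations
--         "String ": "let ",  # String variable declarations
--         ";": "",  # Semicolons are optional in JS
--     }
--
--     js_code = []
--     for line in java_code.splitlines():
--         for java, js in replacements.items():
--             line = line.replace(java, js)
--         js_code.append(line.strip())
--
--     return "\n".join(js_code)
-- ===== SOURCE B (Python) =====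
-- def java_to_js(java_code):
--     """Translate Java code to JavaScript (single left-to-right scan per line)."""
--     rules = [
--         ("System.out.println(", "console.log("),
--         ("public static void main(String[] args)", "function main()"),
--         ("int ", "let "),
--         ("String ", "let "),
--         (";", ""),
--     ]
--     out = []
--     for line in java_code.splitlines():
--         res = []
--         i = 0
--         n = len(line)
--         while i < n:
--             for k, v in rules:
--                 if line.startswith(k, i):
--                     res.append(v)
--                     i += len(k)
--                     break
--             else:
--                 res.append(line[i])
--                 i += 1
--         out.append("".join(res).strip())
--     return "\n".join(out)
-- ===== Notes on version B (the rewrite author's own statement) =====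
-- stated objective: alternative
-- what changed: Replaces A's five sequential full-string .replace passes per line by one table-driven left-to-right scan that emits each line's translation in a single pass.
import Mathlib
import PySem

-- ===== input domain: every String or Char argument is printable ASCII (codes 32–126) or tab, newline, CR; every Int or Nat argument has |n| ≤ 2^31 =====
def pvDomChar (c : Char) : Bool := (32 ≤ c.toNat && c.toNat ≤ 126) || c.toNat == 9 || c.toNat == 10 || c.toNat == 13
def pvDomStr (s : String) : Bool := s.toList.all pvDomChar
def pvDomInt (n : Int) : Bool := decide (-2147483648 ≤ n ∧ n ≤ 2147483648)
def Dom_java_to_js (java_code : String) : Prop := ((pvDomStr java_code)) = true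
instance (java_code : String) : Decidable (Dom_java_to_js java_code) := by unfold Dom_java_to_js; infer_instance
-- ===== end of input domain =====

-- B replaces A's five sequential full-string .replace passes per line with one
-- table-driven left-to-right scan per line (objective: alternative algorithm, same cost class).

-- ===== PORT A =====
def java_to_js (java_code : String) : String :=
  let replacements : List (String × String) :=
    [("System.out.println(", "console.log("),
     ("public static void main(String[] args)", "function main()"),
     ("int ", "let "),
     ("String ", "let "),
     (";", "")]
  let js_code : List String :=
    (PySem.Str.splitlines java_code).foldl
      (fun acc line =>
        acc ++ [PySem.Str.strip (replacements.foldl (fun l p => PySem.Str.replace l p.1 p.2) line)])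
      []
  PySem.Str.join "\n" js_code

-- ===== PORT B =====
-- B-side helper: the fixed rule table (B's `rules`, as char lists)
def jtRules : List (List Char × List Char) :=
  [("System.out.println(".toList, "console.log(".toList),
   ("public static void main(String[] args)".toList, "function main()".toList),
   ("int ".toList, "let ".toList),
   ("String ".toList, "let ".toList),
   (";".toList, "".toList)]

-- B-side helper: the single left-to-right scan (B's while-loop over one line)
def bScan (s : List Char) : List Char :=
  match s with
  | [] => []
  | c :: t =>
    match h : jtRules.find? (fun r => r.1.isPrefixOf (c :: t)) with
    | some r => r.2 ++ bScan ((c :: t).drop r.1.length)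
    | none => c :: bScan t
termination_by s.length
decreasing_by
  · have hm := List.mem_of_find?_eq_some h
    have hp : r.1.isPrefixOf (c :: t) = true := by
      have := List.find?_some h; simpa using this
    have hpos : 0 < r.1.length := by
      have : ∀ x ∈ jtRules, 0 < x.1.length := by decide
      exact this r hm
    simp only [List.length_drop, List.length_cons]
    omega
  · simp

def java_to_js_alt (java_code : String) : String :=
  PySem.Str.join "\n"
    ((PySem.Str.splitlines java_code).map
      (fun line => PySem.Str.strip (String.ofList (bScan line.toList))))

-- ===== PRECONDITION & SPEC =====
def Spec_java_to_js (java_code : String) (out : String) : Prop := out = java_to_js_alt java_code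
instance (java_code : String) (out : String) : Decidable (Spec_java_to_js java_code out) := by unfold Spec_java_to_js; infer_instance

-- ===== CLAIM (what is proved, stated in full; the proofs are below) =====
def Claim_equal_java_to_js : Prop := ∀ (java_code : String), Dom_java_to_js java_code → Spec_java_to_js java_code (java_to_js java_code)

-- ===== LEMMAS AND PROOFS =====

-- the five key/replacement pairs as char-list literals
def cK1 : List Char := ['S', 'y', 's', 't', 'e', 'm', '.', 'o', 'u', 't', '.', 'p', 'r', 'i', 'n', 't', 'l', 'n', '(']
def cV1 : List Char := ['c', 'o', 'n', 's', 'o', 'l', 'e', '.', 'l', 'o', 'g', '(']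
def cK2 : List Char := ['p', 'u', 'b', 'l', 'i', 'c', ' ', 's', 't', 'a', 't', 'i', 'c', ' ', 'v', 'o', 'i', 'd', ' ', 'm', 'a', 'i', 'n', '(', 'S', 't', 'r', 'i', 'n', 'g', '[', ']', ' ', 'a', 'r', 'g', 's', ')']
def cV2 : List Char := ['f', 'u', 'n', 'c', 't', 'i', 'o', 'n', ' ', 'm', 'a', 'i', 'n', '(', ')']
def cK3 : List Char := ['i', 'n', 't', ' ']
def cV3 : List Char := ['l', 'e', 't', ' ']
def cK4 : List Char := ['S', 't', 'r', 'i', 'n', 'g', ' ']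
def cV4 : List Char := ['l', 'e', 't', ' ']
def cK5 : List Char := [';']
def cV5 : List Char := []

theorem jtRules_eq : jtRules = [(cK1, cV1), (cK2, cV2), (cK3, cV3), (cK4, cV4), (cK5, cV5)] := by
  decide

-- clean recursion equivalent to PySem.Chars.replace with a nonempty key k0 :: ks
def rep (k0 : Char) (ks nw : List Char) : List Char → List Char
  | [] => []
  | c :: t =>
    if (k0 :: ks).isPrefixOf (c :: t) then nw ++ rep k0 ks nw (t.drop ks.length)
    else c :: rep k0 ks nw t
termination_by l => l.length
decreasing_by
  · simp only [List.length_drop, List.length_cons]; omega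
  · simp

theorem go_eq_rep (k0 : Char) (ks nw : List Char) :
    ∀ (fuel : Nat) (l acc : List Char), l.length ≤ fuel →
      PySem.Chars.replace.go (k0 :: ks) nw fuel l acc = acc.reverse ++ rep k0 ks nw l := by
  intro fuel
  induction fuel with
  | zero =>
    intro l acc hl
    have : l = [] := by cases l <;> simp_all
    subst this
    simp [PySem.Chars.replace.go, rep]
  | succ n ih =>
    intro l acc hl
    cases l with
    | nil => simp [PySem.Chars.replace.go, rep]
    | cons c t =>
      rw [PySem.Chars.replace.go]
      by_cases hp : (k0 :: ks).isPrefixOf (c :: t) = true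
      · rw [if_pos hp, rep, if_pos hp]
        simp only [List.length_cons, List.drop_succ_cons]
        rw [ih]
        · simp
        · simp only [List.length_cons] at hl
          have := List.length_drop (l := t) (i := ks.length)
          omega
      · rw [if_neg hp, rep, if_neg hp, ih]
        · simp
        · simp only [List.length_cons] at hl; omega

theorem replace_eq_rep (k0 : Char) (ks nw l : List Char) :
    PySem.Chars.replace l (k0 :: ks) nw = rep k0 ks nw l := by
  rw [PySem.Chars.replace]
  simp only [List.isEmpty_cons, if_false, Bool.false_eq_true]
  rw [go_eq_rep k0 ks nw l.length l [] le_rfl]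
  simp

theorem repMatch (k0 : Char) (ks nw : List Char) {c : Char} {t : List Char}
    (h : (k0 :: ks) <+: (c :: t)) :
    rep k0 ks nw (c :: t) = nw ++ rep k0 ks nw (t.drop ks.length) := by
  rw [rep, if_pos (List.isPrefixOf_iff_prefix.mpr h)]

theorem repNoMatch (k0 : Char) (ks nw : List Char) {c : Char} {t : List Char}
    (h : ¬ (k0 :: ks) <+: (c :: t)) :
    rep k0 ks nw (c :: t) = c :: rep k0 ks nw t := by
  rw [rep, if_neg (by simpa [List.isPrefixOf_iff_prefix] using h)]

theorem prefix_append_cases {x y z : List Char} (h : x <+: y ++ z) : x <+: y ∨ y <+: x := by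
  by_cases hl : x.length ≤ y.length
  · exact Or.inl (List.prefix_of_prefix_length_le h (List.prefix_append y z) hl)
  · exact Or.inr (List.prefix_of_prefix_length_le (List.prefix_append y z) h (by omega))

theorem pushW (k0 : Char) (ks nw : List Char) (w t : List Char)
    (hB : ∀ j, j < w.length → ¬ ((k0 :: ks) <+: w.drop j ++ t)) :
    rep k0 ks nw (w ++ t) = w ++ rep k0 ks nw t := by
  induction w with
  | nil => simp
  | cons a w' ih =>
    have h0 : ¬ (k0 :: ks) <+: (a :: (w' ++ t)) := by
      have := hB 0 (by simp)
      simpa using this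
    rw [List.cons_append, repNoMatch k0 ks nw h0,
      ih (fun j hj => by have := hB (j+1) (by simp; omega); simpa using this)]
    simp

-- a key cannot match at any position inside or straddling out of the block w
theorem blockedPush (k0 : Char) (ks nw : List Char) (w : List Char)
    (hb : ∀ j, j < w.length → ¬ ((k0 :: ks) <+: w.drop j) ∧ ¬ (w.drop j <+: (k0 :: ks)))
    (t : List Char) :
    rep k0 ks nw (w ++ t) = w ++ rep k0 ks nw t := by
  apply pushW
  intro j hj h
  rcases prefix_append_cases h with h' | h'
  · exact (hb j hj).1 h'
  · exact (hb j hj).2 h'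

-- a pattern u that is not a prefix of t and cannot meet the replacement nw
-- is still not a prefix of the result of a rep pass
theorem prefix_free_rep (k0 : Char) (ks nw : List Char) :
    ∀ (t u : List Char),
    (∀ u', u' <:+ u → u' ≠ [] → ¬ (u' <+: nw) ∧ ¬ (nw <+: u')) →
    ¬ u <+: t → ¬ u <+: rep k0 ks nw t := by
  suffices H : ∀ (n : Nat) (t u : List Char), t.length ≤ n →
      (∀ u', u' <:+ u → u' ≠ [] → ¬ (u' <+: nw) ∧ ¬ (nw <+: u')) →
      ¬ u <+: t → ¬ u <+: rep k0 ks nw t by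
    intro t u hb hu
    exact H t.length t u le_rfl hb hu
  intro n
  induction n with
  | zero =>
    intro t u ht hb hu
    have : t = [] := by cases t <;> simp_all
    subst this
    simpa [rep] using hu
  | succ n ih =>
    intro t u ht hb hu
    cases t with
    | nil => simpa [rep] using hu
    | cons c t' =>
      by_cases hp : (k0 :: ks) <+: (c :: t')
      · rw [repMatch _ _ _ hp]
        intro hpre
        cases u with
        | nil => exact hu (List.nil_prefix)
        | cons e u' =>
          rcases prefix_append_cases hpre with h | h
          · exact (hb (e :: u') (List.suffix_refl _) (by simp)).1 h
          · exact (hb (e :: u') (List.suffix_refl _) (by simp)).2 h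
      · rw [repNoMatch _ _ _ hp]
        intro hpre
        cases u with
        | nil => exact hu (List.nil_prefix)
        | cons e u' =>
          rw [List.cons_prefix_cons] at hpre
          obtain ⟨rfl, hpre2⟩ := hpre
          cases u' with
          | nil => exact hu (List.cons_prefix_cons.mpr ⟨rfl, List.nil_prefix⟩)
          | cons f u'' =>
            have hu' : ¬ (f :: u'') <+: t' := fun hh =>
              hu (List.cons_prefix_cons.mpr ⟨rfl, hh⟩)
            have hb' : ∀ u₂, u₂ <:+ (f :: u'') → u₂ ≠ [] → ¬ (u₂ <+: nw) ∧ ¬ (nw <+: u₂) :=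
              fun u₂ hs hne => hb u₂ (hs.trans (List.suffix_cons _ _)) hne
            exact ih t' (f :: u'') (by simp at ht ⊢; omega) hb' hu' hpre2

-- turn a decidable statement over u.tails into the suffix form prefix_free_rep expects
theorem hblock_of_tails (u nw : List Char)
    (h : ∀ u' ∈ u.tails, u' ≠ [] → ¬ (u' <+: nw) ∧ ¬ (nw <+: u')) :
    ∀ u', u' <:+ u → u' ≠ [] → ¬ (u' <+: nw) ∧ ¬ (nw <+: u') :=
  fun u' hs hne => h u' ((List.mem_tails _ _).mpr hs) hne

-- the five sequential passes of A on one line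
def seqLine (l : List Char) : List Char :=
  rep ';' cK5.tail cV5 (rep 'S' cK4.tail cV4 (rep 'i' cK3.tail cV3
    (rep 'p' cK2.tail cV2 (rep 'S' cK1.tail cV1 l))))

theorem notpre_append {x y : List Char} (h1 : ¬ x <+: y) (h2 : ¬ y <+: x) (u : List Char) :
    ¬ x <+: y ++ u := fun h => (prefix_append_cases h).elim h1 h2

theorem bScan_nil : bScan [] = [] := by rw [bScan]

theorem bScan_match (c : Char) (t : List Char) (r : List Char × List Char)
    (h : jtRules.find? (fun r => r.1.isPrefixOf (c :: t)) = some r) :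
    bScan (c :: t) = r.2 ++ bScan ((c :: t).drop r.1.length) := by
  rw [bScan]
  split
  · next r' h' => rw [h] at h'; cases h'; rfl
  · next h' => rw [h] at h'; cases h'

theorem bScan_none (c : Char) (t : List Char)
    (h : jtRules.find? (fun r => r.1.isPrefixOf (c :: t)) = none) :
    bScan (c :: t) = c :: bScan t := by
  rw [bScan]
  split
  · next r' h' => rw [h] at h'; cases h'
  · rfl

theorem find1 (u : List Char) :
    jtRules.find? (fun r => r.1.isPrefixOf (cK1 ++ u)) = some (cK1, cV1) := by
  rw [jtRules_eq]
  exact List.find?_cons_of_pos (by simp [List.isPrefixOf_iff_prefix])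

theorem find2 (u : List Char) :
    jtRules.find? (fun r => r.1.isPrefixOf (cK2 ++ u)) = some (cK2, cV2) := by
  rw [jtRules_eq]
  rw [List.find?_cons_of_neg (by
    simp only [List.isPrefixOf_iff_prefix]
    exact notpre_append (by decide) (by decide) u)]
  exact List.find?_cons_of_pos (by simp [List.isPrefixOf_iff_prefix])

theorem find3 (u : List Char) :
    jtRules.find? (fun r => r.1.isPrefixOf (cK3 ++ u)) = some (cK3, cV3) := by
  rw [jtRules_eq]
  rw [List.find?_cons_of_neg (by
    simp only [List.isPrefixOf_iff_prefix]
    exact notpre_append (by decide) (by decide) u)]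
  rw [List.find?_cons_of_neg (by
    simp only [List.isPrefixOf_iff_prefix]
    exact notpre_append (by decide) (by decide) u)]
  exact List.find?_cons_of_pos (by simp [List.isPrefixOf_iff_prefix])

theorem find4 (u : List Char) :
    jtRules.find? (fun r => r.1.isPrefixOf (cK4 ++ u)) = some (cK4, cV4) := by
  rw [jtRules_eq]
  rw [List.find?_cons_of_neg (by
    simp only [List.isPrefixOf_iff_prefix]
    exact notpre_append (by decide) (by decide) u)]
  rw [List.find?_cons_of_neg (by
    simp only [List.isPrefixOf_iff_prefix]
    exact notpre_append (by decide) (by decide) u)]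
  rw [List.find?_cons_of_neg (by
    simp only [List.isPrefixOf_iff_prefix]
    exact notpre_append (by decide) (by decide) u)]
  exact List.find?_cons_of_pos (by simp [List.isPrefixOf_iff_prefix])

theorem find5 (u : List Char) :
    jtRules.find? (fun r => r.1.isPrefixOf (cK5 ++ u)) = some (cK5, cV5) := by
  rw [jtRules_eq]
  rw [List.find?_cons_of_neg (by
    simp only [List.isPrefixOf_iff_prefix]
    exact notpre_append (by decide) (by decide) u)]
  rw [List.find?_cons_of_neg (by
    simp only [List.isPrefixOf_iff_prefix]
    exact notpre_append (by decide) (by decide) u)]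
  rw [List.find?_cons_of_neg (by
    simp only [List.isPrefixOf_iff_prefix]
    exact notpre_append (by decide) (by decide) u)]
  rw [List.find?_cons_of_neg (by
    simp only [List.isPrefixOf_iff_prefix]
    exact notpre_append (by decide) (by decide) u)]
  exact List.find?_cons_of_pos (by simp [List.isPrefixOf_iff_prefix])

theorem findNone (c : Char) (t : List Char)
    (h1 : ¬ cK1 <+: (c :: t)) (h2 : ¬ cK2 <+: (c :: t)) (h3 : ¬ cK3 <+: (c :: t))
    (h4 : ¬ cK4 <+: (c :: t)) (h5 : ¬ cK5 <+: (c :: t)) :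
    jtRules.find? (fun r => r.1.isPrefixOf (c :: t)) = none := by
  rw [jtRules_eq, List.find?_eq_none]
  intro a ha
  fin_cases ha <;>
    simpa only [List.isPrefixOf_iff_prefix, Bool.not_eq_true, decide_eq_false_iff_not]
      using ‹_›

theorem bstep1 (u : List Char) : bScan (cK1 ++ u) = cV1 ++ bScan u := by
  rw [show bScan (cK1 ++ u) = cV1 ++ bScan ((cK1 ++ u).drop cK1.length) from
    bScan_match 'S' (cK1.tail ++ u) (cK1, cV1) (find1 u), List.drop_left]

theorem bstep2 (u : List Char) : bScan (cK2 ++ u) = cV2 ++ bScan u := by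
  rw [show bScan (cK2 ++ u) = cV2 ++ bScan ((cK2 ++ u).drop cK2.length) from
    bScan_match 'p' (cK2.tail ++ u) (cK2, cV2) (find2 u), List.drop_left]

theorem bstep3 (u : List Char) : bScan (cK3 ++ u) = cV3 ++ bScan u := by
  rw [show bScan (cK3 ++ u) = cV3 ++ bScan ((cK3 ++ u).drop cK3.length) from
    bScan_match 'i' (cK3.tail ++ u) (cK3, cV3) (find3 u), List.drop_left]

theorem bstep4 (u : List Char) : bScan (cK4 ++ u) = cV4 ++ bScan u := by
  rw [show bScan (cK4 ++ u) = cV4 ++ bScan ((cK4 ++ u).drop cK4.length) from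
    bScan_match 'S' (cK4.tail ++ u) (cK4, cV4) (find4 u), List.drop_left]

theorem bstep5 (u : List Char) : bScan (cK5 ++ u) = cV5 ++ bScan u := by
  rw [show bScan (cK5 ++ u) = cV5 ++ bScan ((cK5 ++ u).drop cK5.length) from
    bScan_match ';' u (cK5, cV5) (find5 u), List.drop_left]

theorem seq_step1 (u : List Char) : seqLine (cK1 ++ u) = cV1 ++ seqLine u := by
  unfold seqLine
  rw [show rep 'S' cK1.tail cV1 (cK1 ++ u) = cV1 ++ rep 'S' cK1.tail cV1 u from by
    rw [show rep 'S' cK1.tail cV1 (cK1 ++ u)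
        = cV1 ++ rep 'S' cK1.tail cV1 ((cK1.tail ++ u).drop cK1.tail.length) from
      repMatch 'S' cK1.tail cV1 (List.cons_prefix_cons.mpr ⟨rfl, List.prefix_append _ _⟩),
      List.drop_left]]
  rw [blockedPush 'p' cK2.tail cV2 cV1 (by decide)]
  rw [blockedPush 'i' cK3.tail cV3 cV1 (by decide)]
  rw [blockedPush 'S' cK4.tail cV4 cV1 (by decide)]
  rw [blockedPush ';' cK5.tail cV5 cV1 (by decide)]

theorem seq_step2 (u : List Char) : seqLine (cK2 ++ u) = cV2 ++ seqLine u := by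
  unfold seqLine
  rw [blockedPush 'S' cK1.tail cV1 cK2 (by decide)]
  rw [show rep 'p' cK2.tail cV2 (cK2 ++ rep 'S' cK1.tail cV1 u)
      = cV2 ++ rep 'p' cK2.tail cV2 (rep 'S' cK1.tail cV1 u) from by
    rw [show rep 'p' cK2.tail cV2 (cK2 ++ rep 'S' cK1.tail cV1 u)
        = cV2 ++ rep 'p' cK2.tail cV2 ((cK2.tail ++ rep 'S' cK1.tail cV1 u).drop cK2.tail.length) from
      repMatch 'p' cK2.tail cV2 (List.cons_prefix_cons.mpr ⟨rfl, List.prefix_append _ _⟩),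
      List.drop_left]]
  rw [blockedPush 'i' cK3.tail cV3 cV2 (by decide)]
  rw [blockedPush 'S' cK4.tail cV4 cV2 (by decide)]
  rw [blockedPush ';' cK5.tail cV5 cV2 (by decide)]

theorem seq_step3 (u : List Char) : seqLine (cK3 ++ u) = cV3 ++ seqLine u := by
  unfold seqLine
  rw [blockedPush 'S' cK1.tail cV1 cK3 (by decide)]
  rw [blockedPush 'p' cK2.tail cV2 cK3 (by decide)]
  rw [show rep 'i' cK3.tail cV3 (cK3 ++ rep 'p' cK2.tail cV2 (rep 'S' cK1.tail cV1 u))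
      = cV3 ++ rep 'i' cK3.tail cV3 (rep 'p' cK2.tail cV2 (rep 'S' cK1.tail cV1 u)) from by
    rw [show rep 'i' cK3.tail cV3 (cK3 ++ rep 'p' cK2.tail cV2 (rep 'S' cK1.tail cV1 u))
        = cV3 ++ rep 'i' cK3.tail cV3
            ((cK3.tail ++ rep 'p' cK2.tail cV2 (rep 'S' cK1.tail cV1 u)).drop cK3.tail.length) from
      repMatch 'i' cK3.tail cV3 (List.cons_prefix_cons.mpr ⟨rfl, List.prefix_append _ _⟩),
      List.drop_left]]
  rw [blockedPush 'S' cK4.tail cV4 cV3 (by decide)]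
  rw [blockedPush ';' cK5.tail cV5 cV3 (by decide)]

theorem seq_step4 (u : List Char) : seqLine (cK4 ++ u) = cV4 ++ seqLine u := by
  unfold seqLine
  rw [blockedPush 'S' cK1.tail cV1 cK4 (by decide)]
  rw [blockedPush 'p' cK2.tail cV2 cK4 (by decide)]
  rw [blockedPush 'i' cK3.tail cV3 cK4 (by decide)]
  rw [show rep 'S' cK4.tail cV4 (cK4 ++ rep 'i' cK3.tail cV3 (rep 'p' cK2.tail cV2 (rep 'S' cK1.tail cV1 u)))
      = cV4 ++ rep 'S' cK4.tail cV4 (rep 'i' cK3.tail cV3 (rep 'p' cK2.tail cV2 (rep 'S' cK1.tail cV1 u))) from by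
    rw [show rep 'S' cK4.tail cV4 (cK4 ++ rep 'i' cK3.tail cV3 (rep 'p' cK2.tail cV2 (rep 'S' cK1.tail cV1 u)))
        = cV4 ++ rep 'S' cK4.tail cV4
            ((cK4.tail ++ rep 'i' cK3.tail cV3 (rep 'p' cK2.tail cV2 (rep 'S' cK1.tail cV1 u))).drop cK4.tail.length) from
      repMatch 'S' cK4.tail cV4 (List.cons_prefix_cons.mpr ⟨rfl, List.prefix_append _ _⟩),
      List.drop_left]]
  rw [blockedPush ';' cK5.tail cV5 cV4 (by decide)]

theorem seq_step5 (u : List Char) : seqLine (cK5 ++ u) = cV5 ++ seqLine u := by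
  unfold seqLine
  rw [blockedPush 'S' cK1.tail cV1 cK5 (by decide)]
  rw [blockedPush 'p' cK2.tail cV2 cK5 (by decide)]
  rw [blockedPush 'i' cK3.tail cV3 cK5 (by decide)]
  rw [blockedPush 'S' cK4.tail cV4 cK5 (by decide)]
  rw [show rep ';' cK5.tail cV5 (cK5 ++ rep 'S' cK4.tail cV4 (rep 'i' cK3.tail cV3 (rep 'p' cK2.tail cV2 (rep 'S' cK1.tail cV1 u))))
      = cV5 ++ rep ';' cK5.tail cV5 (rep 'S' cK4.tail cV4 (rep 'i' cK3.tail cV3 (rep 'p' cK2.tail cV2 (rep 'S' cK1.tail cV1 u)))) from by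
    rw [show rep ';' cK5.tail cV5 (cK5 ++ rep 'S' cK4.tail cV4 (rep 'i' cK3.tail cV3 (rep 'p' cK2.tail cV2 (rep 'S' cK1.tail cV1 u))))
        = cV5 ++ rep ';' cK5.tail cV5
            ((cK5.tail ++ rep 'S' cK4.tail cV4 (rep 'i' cK3.tail cV3 (rep 'p' cK2.tail cV2 (rep 'S' cK1.tail cV1 u)))).drop cK5.tail.length) from
      repMatch ';' cK5.tail cV5 (List.cons_prefix_cons.mpr ⟨rfl, List.prefix_append _ _⟩),
      List.drop_left]]

theorem seqLine_eq_bScan : ∀ l : List Char, seqLine l = bScan l := by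
  suffices H : ∀ (n : Nat) (l : List Char), l.length ≤ n → seqLine l = bScan l by
    exact fun l => H l.length l le_rfl
  intro n
  induction n with
  | zero =>
    intro l hl
    have hnil : l = [] := by cases l <;> simp_all
    subst hnil
    rw [bScan_nil]
    simp [seqLine, rep]
  | succ n ih =>
    intro l hl
    cases l with
    | nil => rw [bScan_nil]; simp [seqLine, rep]
    | cons c t =>
      simp only [List.length_cons] at hl
      by_cases h1 : cK1 <+: (c :: t)
      · obtain ⟨u, hu⟩ := h1
        have hlen : u.length ≤ n := by
          have := congrArg List.length hu
          simp [cK1] at this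
          omega
        rw [← hu, seq_step1 u, bstep1 u, ih u hlen]
      · by_cases h2 : cK2 <+: (c :: t)
        · obtain ⟨u, hu⟩ := h2
          have hlen : u.length ≤ n := by
            have := congrArg List.length hu
            simp [cK2] at this
            omega
          rw [← hu, seq_step2 u, bstep2 u, ih u hlen]
        · by_cases h3 : cK3 <+: (c :: t)
          · obtain ⟨u, hu⟩ := h3
            have hlen : u.length ≤ n := by
              have := congrArg List.length hu
              simp [cK3] at this
              omega
            rw [← hu, seq_step3 u, bstep3 u, ih u hlen]
          · by_cases h4 : cK4 <+: (c :: t)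
            · obtain ⟨u, hu⟩ := h4
              have hlen : u.length ≤ n := by
                have := congrArg List.length hu
                simp [cK4] at this
                omega
              rw [← hu, seq_step4 u, bstep4 u, ih u hlen]
            · by_cases h5 : cK5 <+: (c :: t)
              · obtain ⟨u, hu⟩ := h5
                have hlen : u.length ≤ n := by
                  have := congrArg List.length hu
                  simp [cK5] at this
                  omega
                rw [← hu, seq_step5 u, bstep5 u, ih u hlen]
              · -- no rule matches at the head
                rw [bScan_none c t (findNone c t h1 h2 h3 h4 h5)]
                have ht : t.length ≤ n := by omega
                have e1 : rep 'S' cK1.tail cV1 (c :: t) = c :: rep 'S' cK1.tail cV1 t :=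
                  repNoMatch _ _ _ h1
                have hfree2 : ¬ ('p' :: cK2.tail) <+: (c :: rep 'S' cK1.tail cV1 t) := by
                  intro hh
                  rw [List.cons_prefix_cons] at hh
                  obtain ⟨hc, hh2⟩ := hh
                  subst hc
                  have hk : ¬ cK2.tail <+: t := fun hx =>
                    h2 (List.cons_prefix_cons.mpr ⟨rfl, hx⟩)
                  exact prefix_free_rep 'S' cK1.tail cV1 t cK2.tail
                    (hblock_of_tails _ _ (by decide)) hk hh2
                have e2 : rep 'p' cK2.tail cV2 (c :: rep 'S' cK1.tail cV1 t)
                    = c :: rep 'p' cK2.tail cV2 (rep 'S' cK1.tail cV1 t) :=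
                  repNoMatch _ _ _ hfree2
                have hfree3 : ¬ ('i' :: cK3.tail) <+:
                    (c :: rep 'p' cK2.tail cV2 (rep 'S' cK1.tail cV1 t)) := by
                  intro hh
                  rw [List.cons_prefix_cons] at hh
                  obtain ⟨hc, hh2⟩ := hh
                  subst hc
                  have hk : ¬ cK3.tail <+: t := fun hx =>
                    h3 (List.cons_prefix_cons.mpr ⟨rfl, hx⟩)
                  have s1 : ¬ cK3.tail <+: rep 'S' cK1.tail cV1 t :=
                    prefix_free_rep 'S' cK1.tail cV1 t cK3.tail
                      (hblock_of_tails _ _ (by decide)) hk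
                  exact prefix_free_rep 'p' cK2.tail cV2 _ cK3.tail
                    (hblock_of_tails _ _ (by decide)) s1 hh2
                have e3 : rep 'i' cK3.tail cV3 (c :: rep 'p' cK2.tail cV2 (rep 'S' cK1.tail cV1 t))
                    = c :: rep 'i' cK3.tail cV3 (rep 'p' cK2.tail cV2 (rep 'S' cK1.tail cV1 t)) :=
                  repNoMatch _ _ _ hfree3
                have hfree4 : ¬ ('S' :: cK4.tail) <+:
                    (c :: rep 'i' cK3.tail cV3 (rep 'p' cK2.tail cV2 (rep 'S' cK1.tail cV1 t))) := by
                  intro hh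
                  rw [List.cons_prefix_cons] at hh
                  obtain ⟨hc, hh2⟩ := hh
                  subst hc
                  have hk : ¬ cK4.tail <+: t := fun hx =>
                    h4 (List.cons_prefix_cons.mpr ⟨rfl, hx⟩)
                  have s1 : ¬ cK4.tail <+: rep 'S' cK1.tail cV1 t :=
                    prefix_free_rep 'S' cK1.tail cV1 t cK4.tail
                      (hblock_of_tails _ _ (by decide)) hk
                  have s2 : ¬ cK4.tail <+: rep 'p' cK2.tail cV2 (rep 'S' cK1.tail cV1 t) :=
                    prefix_free_rep 'p' cK2.tail cV2 _ cK4.tail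
                      (hblock_of_tails _ _ (by decide)) s1
                  exact prefix_free_rep 'i' cK3.tail cV3 _ cK4.tail
                    (hblock_of_tails _ _ (by decide)) s2 hh2
                have e4 : rep 'S' cK4.tail cV4
                      (c :: rep 'i' cK3.tail cV3 (rep 'p' cK2.tail cV2 (rep 'S' cK1.tail cV1 t)))
                    = c :: rep 'S' cK4.tail cV4
                      (rep 'i' cK3.tail cV3 (rep 'p' cK2.tail cV2 (rep 'S' cK1.tail cV1 t))) :=
                  repNoMatch _ _ _ hfree4
                have hfree5 : ¬ (';' :: cK5.tail) <+:
                    (c :: rep 'S' cK4.tail cV4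
                      (rep 'i' cK3.tail cV3 (rep 'p' cK2.tail cV2 (rep 'S' cK1.tail cV1 t)))) := by
                  intro hh
                  rw [List.cons_prefix_cons] at hh
                  obtain ⟨hc, _⟩ := hh
                  subst hc
                  exact h5 (List.cons_prefix_cons.mpr ⟨rfl, List.nil_prefix⟩)
                have e5 : rep ';' cK5.tail cV5
                      (c :: rep 'S' cK4.tail cV4
                        (rep 'i' cK3.tail cV3 (rep 'p' cK2.tail cV2 (rep 'S' cK1.tail cV1 t))))
                    = c :: rep ';' cK5.tail cV5
                      (rep 'S' cK4.tail cV4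
                        (rep 'i' cK3.tail cV3 (rep 'p' cK2.tail cV2 (rep 'S' cK1.tail cV1 t)))) :=
                  repNoMatch _ _ _ hfree5
                show seqLine (c :: t) = c :: bScan t
                unfold seqLine
                rw [e1, e2, e3, e4, e5]
                exact congrArg (c :: ·) (ih t ht)


theorem foldl_append_map {α β : Type} (f : α → β) :
    ∀ (xs : List α) (acc : List β), xs.foldl (fun a x => a ++ [f x]) acc = acc ++ xs.map f := by
  intro xs
  induction xs with
  | nil => intro acc; simp
  | cons x xs ih => intro acc; simp [List.foldl, ih]

theorem line_eq (line : String) :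
    PySem.Str.strip
      (PySem.Str.replace (PySem.Str.replace (PySem.Str.replace (PySem.Str.replace
        (PySem.Str.replace line "System.out.println(" "console.log(")
        "public static void main(String[] args)" "function main()") "int " "let ") "String " "let ") ";" "")
    = PySem.Str.strip (String.ofList (bScan line.toList)) := by
  rw [PySem.Str.strip, PySem.Str.strip]
  apply congrArg String.ofList
  apply congrArg PySem.Chars.strip
  simp only [PySem.Str.toList_replace, String.toList_ofList]
  rw [show ∀ l, PySem.Chars.replace l "System.out.println(".toList "console.log(".toList
      = rep 'S' cK1.tail cV1 l from fun l => replace_eq_rep 'S' cK1.tail cV1 l]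
  rw [show ∀ l, PySem.Chars.replace l "public static void main(String[] args)".toList "function main()".toList
      = rep 'p' cK2.tail cV2 l from fun l => replace_eq_rep 'p' cK2.tail cV2 l]
  rw [show ∀ l, PySem.Chars.replace l "int ".toList "let ".toList
      = rep 'i' cK3.tail cV3 l from fun l => replace_eq_rep 'i' cK3.tail cV3 l]
  rw [show ∀ l, PySem.Chars.replace l "String ".toList "let ".toList
      = rep 'S' cK4.tail cV4 l from fun l => replace_eq_rep 'S' cK4.tail cV4 l]
  rw [show ∀ l, PySem.Chars.replace l ";".toList "".toList
      = rep ';' cK5.tail cV5 l from fun l => replace_eq_rep ';' cK5.tail cV5 l]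
  exact seqLine_eq_bScan line.toList

-- ===== VERDICT (by name: the statement is the Claim_ definition above) =====
theorem java_to_js_spec : Claim_equal_java_to_js := by
  intro jc _
  unfold Spec_java_to_js
  have hA : java_to_js jc = PySem.Str.join "\n"
      ((PySem.Str.splitlines jc).foldl
        (fun acc line =>
          acc ++ [PySem.Str.strip (List.foldl (fun l p => PySem.Str.replace l p.1 p.2) line
            [("System.out.println(", "console.log("),
             ("public static void main(String[] args)", "function main()"),
             ("int ", "let "), ("String ", "let "), (";", "")])]) []) := rfl
  rw [hA]
  rw [java_to_js_alt]
  rw [foldl_append_map]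
  rw [List.nil_append]
  apply congrArg (PySem.Str.join "\n")
  apply List.map_congr_left
  intro line _
  rw [← line_eq line]
  simp only [List.foldl_cons, List.foldl_nil]
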